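-- pv_equiv track=rewrite | github.com/nitishgupta/nmn-drop | datasets/drop/preprocess/ner_process.py | merge_datener_with_yearmentions
-- ===== SOURCE A (Python) =====
-- def merge_datener_with_yearmentions(date_mentions, year_mentions):
--     """ Year mentions are single token long. Using an expensive (O(n^2)) process here.
--         All mentions are (text, (start, end(inclusive)), normalized_value)
--     """
--     year_mentions_to_keep = []
--     for year_mention in year_mentions:
--         token_idx = year_mention[1][0]
--         keep = True
--         for datemen in date_mentions:
--             start, end = datemen[1][0], datemen[1][1]
--             if token_idx >= start and token_idx <= end:
--                 keep = False
--         if keep: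
--             year_mentions_to_keep.append(year_mention)
--
--     final_mentions = date_mentions
--     final_mentions.extend(year_mentions_to_keep)
--     final_mentions = sorted(final_mentions, key=lambda  x: x[1][0])
--
--     return final_mentions
-- ===== SOURCE B (Python) =====
-- def merge_datener_with_yearmentions(date_mentions, year_mentions):
--     """Sort the (non-empty) date intervals by start, merge overlaps into a
--     disjoint ascending list, then test each year's token index against the
--     merged intervals with an early-exit scan (rightmost start <= idx)."""
--     intervals = [(d[1][0], d[1][1]) for d in date_mentions if d[1][0] <= d[1][1]]
--     intervals.sort(key=lambda iv: iv[0])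
--     merged = []
--     for s, e in intervals:
--         if merged and s <= merged[-1][1]:
--             if e > merged[-1][1]:
--                 merged[-1] = (merged[-1][0], e)
--         else:
--             merged.append((s, e))
--
--     def covered(t):
--         # rightmost merged interval whose start is <= t decides containment
--         for s, e in reversed(merged):
--             if t >= s:
--                 return t <= e
--         return False
--
--     kept = [y for y in year_mentions if not covered(y[1][0])]
--     return sorted(date_mentions + kept, key=lambda x: x[1][0])
-- ===== Notes on version B (the rewrite author's own statement) =====
-- stated objective: faster
-- what changed: B sorts the non-empty date intervals, merges them into one disjoint ascending list, and tests each year's token index with an early-exit scan of the merged intervals, instead of A's full inner scan of all date mentions for every year mention.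
import Mathlib
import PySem

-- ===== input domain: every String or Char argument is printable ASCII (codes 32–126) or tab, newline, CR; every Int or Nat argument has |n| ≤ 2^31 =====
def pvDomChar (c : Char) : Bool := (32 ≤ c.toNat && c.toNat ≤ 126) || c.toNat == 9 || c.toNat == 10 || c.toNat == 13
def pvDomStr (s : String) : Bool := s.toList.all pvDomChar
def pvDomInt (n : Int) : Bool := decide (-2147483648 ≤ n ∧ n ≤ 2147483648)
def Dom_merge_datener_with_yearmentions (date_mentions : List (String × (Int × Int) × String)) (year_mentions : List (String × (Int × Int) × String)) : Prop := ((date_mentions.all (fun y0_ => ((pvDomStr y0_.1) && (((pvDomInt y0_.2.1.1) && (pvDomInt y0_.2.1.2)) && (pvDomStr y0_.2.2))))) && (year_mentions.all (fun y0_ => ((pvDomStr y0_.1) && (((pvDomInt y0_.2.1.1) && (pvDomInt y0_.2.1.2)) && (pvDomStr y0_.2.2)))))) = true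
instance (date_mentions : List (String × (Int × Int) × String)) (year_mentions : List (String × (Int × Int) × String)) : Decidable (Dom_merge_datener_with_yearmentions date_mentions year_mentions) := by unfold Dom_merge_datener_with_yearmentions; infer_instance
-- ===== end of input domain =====

-- B replaces A's nested full scans by sort + interval merging + early-exit containment
-- scan (measured faster in a timing run). Equivalence is about the RETURN value only:
-- Python A also mutates date_mentions in place (extend), B does not.

-- ===== PORT A =====
def merge_datener_with_yearmentions (date_mentions : List (String × (Int × Int) × String)) (year_mentions : List (String × (Int × Int) × String)) : List (String × (Int × Int) × String) :=
  let year_mentions_to_keep := year_mentions.foldl (fun acc year_mention =>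
    let token_idx := year_mention.2.1.1
    let keep := date_mentions.foldl (fun keep datemen =>
      if token_idx ≥ datemen.2.1.1 ∧ token_idx ≤ datemen.2.1.2 then false else keep) true
    if keep then acc ++ [year_mention] else acc) []
  PySem.List.sorted (date_mentions ++ year_mentions_to_keep) (fun x => x.2.1.1)

-- ===== PORT B =====
-- Python's `merged` is kept in REVERSE order here (head = merged[-1]): append /
-- modify-last become cons / modify-head, and covered's `reversed(merged)` scan
-- walks it head-first — the same comparisons step for step.
def pvMergeStep (acc : List (Int × Int)) (p : Int × Int) : List (Int × Int) :=
  match acc with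
  | (ms, me) :: rest =>
      if p.1 ≤ me then (if p.2 > me then (ms, p.2) :: rest else (ms, me) :: rest)
      else p :: (ms, me) :: rest
  | [] => [p]

def pvCovered (merged : List (Int × Int)) (t : Int) : Bool :=
  match merged with
  | [] => false
  | (s, e) :: rest => if t ≥ s then t ≤ e else pvCovered rest t

def merge_datener_with_yearmentions_alt (date_mentions : List (String × (Int × Int) × String)) (year_mentions : List (String × (Int × Int) × String)) : List (String × (Int × Int) × String) :=
  let intervals := PySem.List.sorted
    ((date_mentions.filter (fun d => decide (d.2.1.1 ≤ d.2.1.2))).map (fun d => d.2.1))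
    (fun iv => iv.1)
  let merged := intervals.foldl pvMergeStep []
  let kept := year_mentions.filter (fun y => !pvCovered merged y.2.1.1)
  PySem.List.sorted (date_mentions ++ kept) (fun x => x.2.1.1)

-- ===== PRECONDITION & SPEC =====
def Spec_merge_datener_with_yearmentions (date_mentions : List (String × (Int × Int) × String)) (year_mentions : List (String × (Int × Int) × String)) (out : List (String × (Int × Int) × String)) : Prop := out = merge_datener_with_yearmentions_alt date_mentions year_mentions
instance (date_mentions : List (String × (Int × Int) × String)) (year_mentions : List (String × (Int × Int) × String)) (out : List (String × (Int × Int) × String)) : Decidable (Spec_merge_datener_with_yearmentions date_mentions year_mentions out) := by unfold Spec_merge_datener_with_yearmentions; infer_instance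

-- ===== CLAIM (what is proved, stated in full; the proofs are below) =====
def Claim_equal_merge_datener_with_yearmentions : Prop := ∀ (date_mentions : List (String × (Int × Int) × String)) (year_mentions : List (String × (Int × Int) × String)), Dom_merge_datener_with_yearmentions date_mentions year_mentions → Spec_merge_datener_with_yearmentions date_mentions year_mentions (merge_datener_with_yearmentions date_mentions year_mentions)

-- ===== LEMMAS AND PROOFS =====

-- "some interval of ivs contains t"
def pvCovP (t : Int) (ivs : List (Int × Int)) : Bool :=
  ivs.any (fun p => decide (p.1 ≤ t) && decide (t ≤ p.2))

lemma pv_inner_foldl (dm : List (String × (Int × Int) × String)) (t : Int) :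
    ∀ b : Bool, dm.foldl (fun keep d =>
      if t ≥ d.2.1.1 ∧ t ≤ d.2.1.2 then false else keep) b
      = (b && !(pvCovP t (dm.map (fun d => d.2.1)))) := by
  induction dm with
  | nil => intro b; simp [pvCovP]
  | cons d rest ih =>
      intro b
      simp only [List.foldl_cons, List.map_cons]
      rw [ih]
      have hcons : pvCovP t (d.2.1 :: rest.map (fun d => d.2.1))
          = ((decide (d.2.1.1 ≤ t) && decide (t ≤ d.2.1.2))
             || pvCovP t (rest.map (fun d => d.2.1))) := by
        simp [pvCovP]
      rw [hcons]
      by_cases h : t ≥ d.2.1.1 ∧ t ≤ d.2.1.2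
      · rw [if_pos h]
        simp [h.1, h.2]
      · rw [if_neg h]
        have hpd : (decide (d.2.1.1 ≤ t) && decide (t ≤ d.2.1.2)) = false := by
          simp only [Bool.and_eq_false_iff, decide_eq_false_iff_not]
          omega
        rw [hpd, Bool.false_or]

lemma pv_keep_foldl {α : Type} (p : α → Bool) (ys : List α) :
    ∀ acc : List α, ys.foldl (fun acc y => if p y then acc ++ [y] else acc) acc
      = acc ++ ys.filter p := by
  induction ys with
  | nil => intro acc; simp
  | cons y rest ih =>
      intro acc
      by_cases h : p y <;> simp [h, ih]

lemma pv_step_cov (acc : List (Int × Int)) (p : Int × Int) (t : Int)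
    (hp : p.1 ≤ p.2)
    (hhead : ∀ q, acc.head? = some q → q.1 ≤ q.2 ∧ q.1 ≤ p.1) :
    pvCovered (pvMergeStep acc p) t
      = (pvCovered acc t || (decide (p.1 ≤ t) && decide (t ≤ p.2))) := by
  rcases acc with _ | ⟨⟨ms, me⟩, rest⟩
  · simp [pvMergeStep, pvCovered]
  · obtain ⟨h1, h2⟩ := hhead (ms, me) rfl
    obtain ⟨ps, pe⟩ := p
    simp only at hp h1 h2
    simp only [pvMergeStep]
    by_cases hov : ps ≤ me
    · rw [if_pos hov]
      by_cases hext : pe > me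
      · rw [if_pos hext]
        simp only [pvCovered]
        by_cases hms : t ≥ ms
        · rw [if_pos hms, if_pos hms]
          rw [Bool.eq_iff_iff]
          simp only [Bool.or_eq_true, Bool.and_eq_true, decide_eq_true_eq]
          omega
        · rw [if_neg hms, if_neg hms]
          have hfalse : decide (ps ≤ t) = false := by
            simp only [decide_eq_false_iff_not]; omega
          rw [hfalse, Bool.false_and, Bool.or_false]
      · rw [if_neg hext]
        simp only [pvCovered]
        by_cases hms : t ≥ ms
        · rw [if_pos hms]
          rw [Bool.eq_iff_iff]
          simp only [Bool.or_eq_true, Bool.and_eq_true, decide_eq_true_eq]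
          omega
        · rw [if_neg hms]
          have hfalse : decide (ps ≤ t) = false := by
            simp only [decide_eq_false_iff_not]; omega
          rw [hfalse, Bool.false_and, Bool.or_false]
    · rw [if_neg hov]
      simp only [pvCovered]
      by_cases hps : t ≥ ps
      · rw [if_pos hps, if_pos (show t ≥ ms by omega)]
        rw [Bool.eq_iff_iff]
        simp only [Bool.or_eq_true, Bool.and_eq_true, decide_eq_true_eq]
        omega
      · rw [if_neg hps]
        have hfalse : decide (ps ≤ t) = false := by
          simp only [decide_eq_false_iff_not]; omega
        rw [hfalse, Bool.false_and, Bool.or_false]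

lemma pv_merge_cov : ∀ (xs acc : List (Int × Int)),
    List.Pairwise (fun a b => a.1 ≤ b.1) xs →
    (∀ p ∈ xs, p.1 ≤ p.2) →
    (∀ q, acc.head? = some q → q.1 ≤ q.2 ∧ ∀ p ∈ xs, q.1 ≤ p.1) →
    ∀ t, pvCovered (xs.foldl pvMergeStep acc) t = (pvCovered acc t || pvCovP t xs) := by
  intro xs
  induction xs with
  | nil => intro acc _ _ _ t; simp [pvCovP]
  | cons p rest ih =>
      intro acc hpw hne hhead t
      have hpair := (List.pairwise_cons.mp hpw).1
      have hpne : p.1 ≤ p.2 := hne p (by simp)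
      have hstep : ∀ q, (pvMergeStep acc p).head? = some q →
          q.1 ≤ q.2 ∧ ∀ r ∈ rest, q.1 ≤ r.1 := by
        intro q hq
        rcases acc with _ | ⟨⟨ms, me⟩, acct⟩
        · simp [pvMergeStep] at hq
          subst hq
          exact ⟨hpne, fun r hr => hpair r hr⟩
        · obtain ⟨h1, h2⟩ := hhead (ms, me) rfl
          have h2' : ms ≤ p.1 := h2 p (by simp)
          simp only [pvMergeStep] at hq
          split_ifs at hq <;> simp only [List.head?, Option.some.injEq] at hq <;>
            rw [← hq]
          · exact ⟨by omega, fun r hr => le_trans h2' (hpair r hr)⟩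
          · exact ⟨h1, fun r hr => le_trans h2' (hpair r hr)⟩
          · exact ⟨hpne, fun r hr => hpair r hr⟩
      have hhd : ∀ q, acc.head? = some q → q.1 ≤ q.2 ∧ q.1 ≤ p.1 := by
        intro q hq
        obtain ⟨h1, h2⟩ := hhead q hq
        exact ⟨h1, h2 p (by simp)⟩
      simp only [List.foldl_cons]
      rw [ih (pvMergeStep acc p) (List.pairwise_cons.mp hpw).2
          (fun r hr => hne r (by simp [hr])) hstep t,
        pv_step_cov acc p t hpne hhd]
      simp [pvCovP, Bool.or_assoc]

-- pvCovered on the merged intervals decides exactly "t lies in some date interval of dm"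
lemma pv_covered_eq (dm : List (String × (Int × Int) × String)) (t : Int) :
    pvCovered
      ((PySem.List.sorted
        ((dm.filter (fun d => decide (d.2.1.1 ≤ d.2.1.2))).map (fun d => d.2.1))
        (fun iv => iv.1)).foldl pvMergeStep []) t
      = pvCovP t (dm.map (fun d => d.2.1)) := by
  set base := (dm.filter (fun d => decide (d.2.1.1 ≤ d.2.1.2))).map (fun d => d.2.1) with hbase
  set xs := PySem.List.sorted base (fun iv => iv.1) with hxs
  have hperm : xs.Perm base := PySem.List.sorted_perm ..
  have hpw : List.Pairwise (fun a b : Int × Int => a.1 ≤ b.1) xs :=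
    PySem.List.sorted_pairwise ..
  have hne : ∀ p ∈ xs, p.1 ≤ p.2 := by
    intro p hp
    have : p ∈ base := hperm.mem_iff.mp hp
    simp only [hbase, List.mem_map, List.mem_filter] at this
    obtain ⟨d, ⟨_, hd⟩, rfl⟩ := this
    exact of_decide_eq_true hd
  rw [pv_merge_cov xs [] hpw hne (by intro q hq; simp [List.head?] at hq) t]
  simp only [pvCovered, Bool.false_or]
  -- any over a permutation, then drop the (redundant) nonemptiness filter
  rw [Bool.eq_iff_iff]
  simp only [pvCovP, List.any_eq_true]
  constructor
  · rintro ⟨p, hp, h⟩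
    have hp' : p ∈ base := hperm.mem_iff.mp hp
    simp only [hbase, List.mem_map, List.mem_filter] at hp'
    obtain ⟨d, ⟨hd, _⟩, rfl⟩ := hp'
    exact ⟨d.2.1, List.mem_map_of_mem hd, h⟩
  · rintro ⟨p, hp, h⟩
    simp only [List.mem_map] at hp
    obtain ⟨d, hd, rfl⟩ := hp
    refine ⟨d.2.1, hperm.mem_iff.mpr ?_, h⟩
    simp only [hbase, List.mem_map, List.mem_filter]
    refine ⟨d, ⟨hd, ?_⟩, rfl⟩
    simp only [Bool.and_eq_true, decide_eq_true_eq] at h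
    simp only [decide_eq_true_eq]
    omega

-- ===== VERDICT (by name: the statement is the Claim_ definition above) =====
theorem merge_datener_with_yearmentions_spec : Claim_equal_merge_datener_with_yearmentions := by
  intro dm ym _
  unfold Spec_merge_datener_with_yearmentions
  unfold merge_datener_with_yearmentions merge_datener_with_yearmentions_alt
  simp only []
  rw [pv_keep_foldl]
  congr 1
  · congr 1
    apply List.filter_congr
    intro y _
    rw [pv_inner_foldl, pv_covered_eq]
    simp
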